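-- pv_equiv track=rewrite | github.com/Gophercs/trifo_lucy_re | server/capture_server.py | qlcloud_decrypt
-- ===== SOURCE A (Python) =====
-- def _ql_setup_steps(seed):
--     hi_raw = (seed >> 10) & 0x3FF
--     lo_raw = seed & 0x3FF
--     return hi_raw + 0x173, lo_raw + 0x33D
--
-- def _ql_next_key(key_input, step_hi, step_lo):
--     t = (key_input * step_hi + step_lo) & 0xFFF
--     return (t + 0x6F) & 0xFF
--
-- def qlcloud_decrypt(buf, start, end, initial_key, seed):
--     step_hi, step_lo = _ql_setup_steps(seed)
--     key = initial_key & 0xFF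
--     for i in range(start, end):
--         ct = buf[i]
--         key_input = (ct + key) & 0xFFFFFFFF
--         buf[i] = (ct ^ key) & 0xFF
--         key = _ql_next_key(key_input, step_hi, step_lo)
--     return buf
-- ===== SOURCE B (Python) =====
-- # Two-pass decomposition: pass 1 derives the whole keystream from the original
-- # bytes (the chained key schedule never depends on outputs), pass 2 XORs it in.
-- def qlcloud_decrypt(buf, start, end, initial_key, seed):
--     step_hi = ((seed >> 10) & 0x3FF) + 0x173
--     step_lo = (seed & 0x3FF) + 0x33D
--     keystream = []
--     key = initial_key & 0xFF
--     for i in range(start, end):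
--         key_input = (buf[i] + key) & 0xFFFFFFFF
--         keystream.append(key)
--         key = (((key_input * step_hi + step_lo) & 0xFFF) + 0x6F) & 0xFF
--     for j, i in enumerate(range(start, end)):
--         buf[i] = (buf[i] ^ keystream[j]) & 0xFF
--     return buf
-- ===== Notes on version B (the rewrite author's own statement) =====
-- stated objective: alternative
-- what changed: B replaces A's single in-place loop (read byte, XOR it into place, chain the key) by a two-pass table-building decomposition: pass 1 derives the entire keystream list from the original bytes without mutating the buffer, pass 2 XORs the precomputed keystream into the buffer.
-- outside the precondition, e.g. on qlcloud_decrypt([1, 2, 3], -3, 2, 5, 7): A returns [112, 252, 251], B returns [112, 37, 251]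
import Mathlib
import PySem

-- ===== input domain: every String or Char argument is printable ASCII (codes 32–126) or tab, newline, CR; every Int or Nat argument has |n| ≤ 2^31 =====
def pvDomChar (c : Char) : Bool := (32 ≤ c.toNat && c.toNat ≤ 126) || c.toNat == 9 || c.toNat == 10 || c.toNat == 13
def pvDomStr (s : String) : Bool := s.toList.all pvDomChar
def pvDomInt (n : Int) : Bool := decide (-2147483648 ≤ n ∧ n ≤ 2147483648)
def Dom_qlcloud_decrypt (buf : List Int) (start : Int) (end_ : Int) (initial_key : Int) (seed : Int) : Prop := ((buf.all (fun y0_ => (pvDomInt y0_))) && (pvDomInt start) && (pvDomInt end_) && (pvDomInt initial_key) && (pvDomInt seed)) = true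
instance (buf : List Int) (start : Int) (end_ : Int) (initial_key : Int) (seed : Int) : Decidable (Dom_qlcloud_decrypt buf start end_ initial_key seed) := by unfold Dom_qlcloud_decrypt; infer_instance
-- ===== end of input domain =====

-- B re-derives the whole keystream from the original bytes in a first pass and XORs it in
-- in a second pass (objective: alternative two-pass decomposition; same cost). Both A and B
-- mutate buf in place in Python; the equivalence proved here is about the return value.

-- ===== PORT A =====
def ql_setup_steps (seed : Int) : Int × Int :=
  (PySem.Int.band (seed >>> (10 : Nat)) 0x3FF + 0x173,
   PySem.Int.band seed 0x3FF + 0x33D)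

def ql_next_key (key_input step_hi step_lo : Int) : Int :=
  let t := PySem.Int.band (key_input * step_hi + step_lo) 0xFFF
  PySem.Int.band (t + 0x6F) 0xFF

-- the loop body of A (named so the proofs can speak about it; same code)
def pvAStep (step_hi step_lo : Int) (st : List Int × Int) (i : Int) : List Int × Int :=
  let ct := PySem.List.pyGetD st.1 i 0          -- buf[i]; Pre_ keeps i in range
  let key_input := PySem.Int.band (ct + st.2) 0xFFFFFFFF
  (PySem.List.pySetD st.1 i (PySem.Int.band (PySem.Int.bxor ct st.2) 0xFF),
   ql_next_key key_input step_hi step_lo)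

def qlcloud_decrypt (buf : List Int) (start : Int) (end_ : Int) (initial_key : Int) (seed : Int) : List Int :=
  let sh := ql_setup_steps seed
  ((PySem.List.pyRange start end_ 1).foldl (pvAStep sh.1 sh.2)
    (buf, PySem.Int.band initial_key 0xFF)).1

-- ===== PORT B =====
-- pass 1 body: read ORIGINAL buf, collect the key used, chain the key
def pvBKeyStep (buf : List Int) (step_hi step_lo : Int) (st : List Int × Int) (i : Int) : List Int × Int :=
  let key_input := PySem.Int.band (PySem.List.pyGetD buf i 0 + st.2) 0xFFFFFFFF
  (st.1 ++ [st.2],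
   PySem.Int.band (PySem.Int.band (key_input * step_hi + step_lo) 0xFFF + 0x6F) 0xFF)

-- pass 2 body: buf[i] = (buf[i] ^ keystream[j]) & 0xFF
def pvBWriteStep (ks : List Int) (b : List Int) (ji : Int × Int) : List Int :=
  PySem.List.pySetD b ji.2
    (PySem.Int.band (PySem.Int.bxor (PySem.List.pyGetD b ji.2 0) (PySem.List.pyGetD ks ji.1 0)) 0xFF)

def qlcloud_decrypt_alt (buf : List Int) (start : Int) (end_ : Int) (initial_key : Int) (seed : Int) : List Int :=
  let step_hi := PySem.Int.band (seed >>> (10 : Nat)) 0x3FF + 0x173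
  let step_lo := PySem.Int.band seed 0x3FF + 0x33D
  let ks := ((PySem.List.pyRange start end_ 1).foldl (pvBKeyStep buf step_hi step_lo)
              ([], PySem.Int.band initial_key 0xFF)).1
  (PySem.List.enumerate (PySem.List.pyRange start end_ 1) 0).foldl (pvBWriteStep ks) buf

-- ===== PRECONDITION & SPEC =====
-- Pre_ excludes ranges that reach buf only through Python's negative-index wraparound:
-- there the in-place A can visit the same byte twice (index i and i+len(buf) alias), so its
-- key chain reads bytes it has already overwritten — an artefact of A's in-place mutation —
-- while B reads the original buffer; it also excludes out-of-range indices, where A raises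
-- IndexError.
def Pre_qlcloud_decrypt (buf : List Int) (start : Int) (end_ : Int) (initial_key : Int) (seed : Int) : Prop :=
  start < end_ → 0 ≤ start ∧ end_ ≤ (buf.length : Int)
instance (buf : List Int) (start : Int) (end_ : Int) (initial_key : Int) (seed : Int) : Decidable (Pre_qlcloud_decrypt buf start end_ initial_key seed) := by unfold Pre_qlcloud_decrypt; infer_instance

def pvWitness_qlcloud_decrypt : List Int × Int × Int × Int × Int := ([1, 2, 3], 0, 3, 5, 7)

def Spec_qlcloud_decrypt (buf : List Int) (start : Int) (end_ : Int) (initial_key : Int) (seed : Int) (out : List Int) : Prop := out = qlcloud_decrypt_alt buf start end_ initial_key seed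
instance (buf : List Int) (start : Int) (end_ : Int) (initial_key : Int) (seed : Int) (out : List Int) : Decidable (Spec_qlcloud_decrypt buf start end_ initial_key seed out) := by unfold Spec_qlcloud_decrypt; infer_instance

-- ===== CLAIM (what is proved, stated in full; the proofs are below) =====
def Claim_equal_qlcloud_decrypt : Prop := ∀ (buf : List Int) (start : Int) (end_ : Int) (initial_key : Int) (seed : Int), Dom_qlcloud_decrypt buf start end_ initial_key seed → Pre_qlcloud_decrypt buf start end_ initial_key seed → Spec_qlcloud_decrypt buf start end_ initial_key seed (qlcloud_decrypt buf start end_ initial_key seed)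

-- ===== LEMMAS AND PROOFS =====

-- the chained key recurrence, as a function of the byte read and the current key
def pvNK (hi lo ct k : Int) : Int :=
  PySem.Int.band (PySem.Int.band (PySem.Int.band (ct + k) 0xFFFFFFFF * hi + lo) 0xFFF + 0x6F) 0xFF

-- keystream generated from a list of bytes
def pvKS (hi lo : Int) : List Int → Int → List Int
  | [], _ => []
  | ct :: xs, k => k :: pvKS hi lo xs (pvNK hi lo ct k)

-- final key after consuming a list of bytes
def pvKF (hi lo : Int) : List Int → Int → Int
  | [], k => k
  | ct :: xs, k => pvKF hi lo xs (pvNK hi lo ct k)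

-- reference model: decrypt n bytes starting at Nat index s
def pvModel (hi lo : Int) : Nat → List Int → Nat → Int → List Int
  | 0, b, _, _ => b
  | n + 1, b, s, k =>
      let ct := b.getD s 0
      pvModel hi lo n (b.set s (PySem.Int.band (PySem.Int.bxor ct k) 0xFF)) (s + 1) (pvNK hi lo ct k)

-- write a precomputed keystream into consecutive positions
def pvWrite : List Int → Nat → List Int → List Int
  | b, _, [] => b
  | b, s, k :: ks =>
      pvWrite (b.set s (PySem.Int.band (PySem.Int.bxor (b.getD s 0) k) 0xFF)) (s + 1) ks

lemma pvA_next_eq (hi lo ct k : Int) :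
    ql_next_key (PySem.Int.band (ct + k) 0xFFFFFFFF) hi lo = pvNK hi lo ct k := rfl

lemma pv_ks_length (hi lo : Int) : ∀ (xs : List Int) (k : Int), (pvKS hi lo xs k).length = xs.length
  | [], _ => rfl
  | _ :: xs, k => by simp [pvKS, pv_ks_length hi lo xs]

lemma pvA_loop (hi lo : Int) : ∀ (n s : Nat) (b : List Int) (k : Int), s + n ≤ b.length →
    (PySem.List.pyRange (s : Int) ((s : Int) + (n : Int)) 1).foldl (pvAStep hi lo) (b, k)
      = (pvModel hi lo n b s k, pvKF hi lo ((b.drop s).take n) k) := by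
  intro n
  induction n with
  | zero =>
      intro s b k _
      rw [PySem.List.pyRange_one_eq_nil (by omega)]
      simp [pvModel, pvKF]
  | succ n ih =>
      intro s b k hlen
      rw [PySem.List.pyRange_one_cons (by push_cast; omega)]
      have hs : s < b.length := by omega
      have hdrop : b.drop s = b[s] :: b.drop (s + 1) := List.drop_eq_getElem_cons hs
      have hstep : pvAStep hi lo (b, k) (s : Int)
          = (b.set s (PySem.Int.band (PySem.Int.bxor b[s] k) 0xFF), pvNK hi lo b[s] k) := by
        simp [pvAStep, PySem.List.pyGetD_natCast, PySem.List.pySetD_natCast,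
          List.getElem?_eq_getElem hs, pvA_next_eq]
      have hcast : (s : Int) + 1 = ((s + 1 : Nat) : Int) := by push_cast; ring
      have hcast2 : (s : Int) + ((n + 1 : Nat) : Int) = ((s + 1 : Nat) : Int) + (n : Int) := by
        push_cast; ring
      rw [List.foldl_cons, hstep, hcast2, hcast,
        ih (s + 1) (b.set s (PySem.Int.band (PySem.Int.bxor b[s] k) 0xFF)) (pvNK hi lo b[s] k)
          (by simpa using by omega)]
      have hds : (b.set s (PySem.Int.band (PySem.Int.bxor b[s] k) 0xFF)).drop (s + 1)
          = b.drop (s + 1) := by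
        rw [List.drop_set]; simp
      rw [hds]
      have hget : b.getD s 0 = b[s] := List.getD_eq_getElem _ _ hs
      have hmod : pvModel hi lo (n + 1) b s k
          = pvModel hi lo n (b.set s (PySem.Int.band (PySem.Int.bxor b[s] k) 0xFF)) (s + 1)
              (pvNK hi lo b[s] k) := by
        simp only [pvModel, hget]
      have hkf : pvKF hi lo (List.take (n + 1) (List.drop s b)) k
          = pvKF hi lo (List.take n (List.drop (s + 1) b)) (pvNK hi lo b[s] k) := by
        rw [hdrop, List.take_succ_cons]; rfl
      rw [hmod, hkf]

lemma pvB_keys (buf : List Int) (hi lo : Int) : ∀ (n s : Nat) (k : Int) (acc : List Int),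
    s + n ≤ buf.length →
    (PySem.List.pyRange (s : Int) ((s : Int) + (n : Int)) 1).foldl (pvBKeyStep buf hi lo) (acc, k)
      = (acc ++ pvKS hi lo ((buf.drop s).take n) k, pvKF hi lo ((buf.drop s).take n) k) := by
  intro n
  induction n with
  | zero =>
      intro s k acc _
      rw [PySem.List.pyRange_one_eq_nil (by omega)]
      simp [pvKS, pvKF]
  | succ n ih =>
      intro s k acc hlen
      rw [PySem.List.pyRange_one_cons (by push_cast; omega)]
      have hs : s < buf.length := by omega
      have hdrop : buf.drop s = buf[s] :: buf.drop (s + 1) := List.drop_eq_getElem_cons hs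
      have hstep : pvBKeyStep buf hi lo (acc, k) (s : Int)
          = (acc ++ [k], pvNK hi lo buf[s] k) := by
        simp [pvBKeyStep, PySem.List.pyGetD_natCast, List.getElem?_eq_getElem hs, pvNK]
      have hcast : (s : Int) + 1 = ((s + 1 : Nat) : Int) := by push_cast; ring
      have hcast2 : (s : Int) + ((n + 1 : Nat) : Int) = ((s + 1 : Nat) : Int) + (n : Int) := by
        push_cast; ring
      rw [List.foldl_cons, hstep, hcast2, hcast, ih (s + 1) (pvNK hi lo buf[s] k) (acc ++ [k]) (by omega)]
      rw [hdrop, List.take_succ_cons]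
      simp [pvKS, pvKF]

lemma pvB_write (ks0 : List Int) : ∀ (tail pre : List Int) (b : List Int) (s : Nat) (e : Int),
    ks0 = pre ++ tail → (s : Int) + tail.length = e → s + tail.length ≤ b.length →
    (PySem.List.enumerate (PySem.List.pyRange (s : Int) e 1) (pre.length : Int)).foldl
        (pvBWriteStep ks0) b
      = pvWrite b s tail := by
  intro tail
  induction tail with
  | nil =>
      intro pre b s e _ he _
      rw [PySem.List.pyRange_one_eq_nil (by simp at he; omega)]
      simp [pvWrite]
  | cons k ks ih =>
      intro pre b s e hks he hlen
      rw [PySem.List.pyRange_one_cons (by simp at he; omega), PySem.List.enumerate_cons]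
      have hs : s < b.length := by simp at hlen; omega
      have hstep : pvBWriteStep ks0 b ((pre.length : Int), (s : Int))
          = b.set s (PySem.Int.band (PySem.Int.bxor (b.getD s 0) k) 0xFF) := by
        simp [pvBWriteStep, PySem.List.pyGetD_natCast, PySem.List.pySetD_natCast, hks]
      have hcast : (s : Int) + 1 = ((s + 1 : Nat) : Int) := by push_cast; ring
      have hcastp : (pre.length : Int) + 1 = (((pre ++ [k]).length : Nat) : Int) := by
        simp
      rw [List.foldl_cons, hstep, hcast, hcastp,
        ih (pre ++ [k]) _ (s + 1) e (by simp [hks]) (by simp at he ⊢; omega)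
          (by simp at hlen ⊢; omega)]
      rfl

lemma pv_write_model (hi lo : Int) : ∀ (n s : Nat) (b : List Int) (k : Int),
    s + n ≤ b.length →
    pvWrite b s (pvKS hi lo ((b.drop s).take n) k) = pvModel hi lo n b s k := by
  intro n
  induction n with
  | zero =>
      intro s b k _
      simp [pvKS, pvWrite, pvModel]
  | succ n ih =>
      intro s b k hlen
      have hs : s < b.length := by omega
      have hdrop : b.drop s = b[s] :: b.drop (s + 1) := List.drop_eq_getElem_cons hs
      rw [hdrop]
      show pvWrite b s (k :: pvKS hi lo ((b.drop (s + 1)).take n) (pvNK hi lo b[s] k)) = _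
      have hget : b.getD s 0 = b[s] := List.getD_eq_getElem _ _ hs
      set v := PySem.Int.band (PySem.Int.bxor b[s] k) 0xFF with hv
      have hds : (b.set s v).drop (s + 1) = b.drop (s + 1) := by rw [List.drop_set]; simp
      have : pvWrite b s (k :: pvKS hi lo ((b.drop (s + 1)).take n) (pvNK hi lo b[s] k))
          = pvWrite (b.set s v) (s + 1) (pvKS hi lo (((b.set s v).drop (s + 1)).take n) (pvNK hi lo b[s] k)) := by
        rw [hds]; simp [pvWrite, hv, List.getElem?_eq_getElem hs]
      rw [this, ih (s + 1) (b.set s v) (pvNK hi lo b[s] k) (by simpa using by omega)]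
      simp [pvModel, hv, List.getElem?_eq_getElem hs]

-- ===== VERDICT (by name: the statement is the Claim_ definition above) =====
theorem qlcloud_decrypt_spec : Claim_equal_qlcloud_decrypt := by
  intro buf start end_ initial_key seed _ hpre
  simp only [Spec_qlcloud_decrypt, qlcloud_decrypt, qlcloud_decrypt_alt, ql_setup_steps]
  by_cases h : start < end_
  · obtain ⟨h0, hle⟩ := hpre h
    set hi := PySem.Int.band (seed >>> (10 : Nat)) 0x3FF + 0x173
    set lo := PySem.Int.band seed 0x3FF + 0x33D
    have hs : start = ((start.toNat : Nat) : Int) := by omega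
    have he : end_ = ((start.toNat : Nat) : Int) + (((end_ - start).toNat : Nat) : Int) := by omega
    rw [hs, he]
    have hbound : start.toNat + (end_ - start).toNat ≤ buf.length := by omega
    rw [pvA_loop hi lo _ _ _ _ hbound, pvB_keys buf hi lo _ _ _ [] hbound]
    dsimp only [List.nil_append, List.length_nil, Nat.cast_zero]
    have hw := pvB_write
      (pvKS hi lo ((List.drop start.toNat buf).take (end_ - start).toNat) (PySem.Int.band initial_key 255))
      (pvKS hi lo ((List.drop start.toNat buf).take (end_ - start).toNat) (PySem.Int.band initial_key 255))
      [] buf start.toNat (((start.toNat : Nat) : Int) + (((end_ - start).toNat : Nat) : Int))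
      rfl (by simp [pv_ks_length]; omega) (by simp [pv_ks_length]; omega)
    simp only [List.length_nil, Nat.cast_zero] at hw
    rw [hw]
    exact (pv_write_model hi lo _ _ _ _ hbound).symm
  · rw [PySem.List.pyRange_one_eq_nil (by omega)]
    simp
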